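-- pv_equiv track=rewrite | github.com/Hom-Kasidej/OOP | Lab3/3.py | is_plusone_dictionary
-- ===== SOURCE A (Python) =====
-- def is_plusone_dictionary(d):
--     dict_list = []
--     for key in d:
--         dict_list.append(key)
--         dict_list.append(d[key])
--     for index in range(1,len(dict_list)):
--         if dict_list[index] - dict_list[index - 1] != 1:
--             return False
--     return True
-- ===== SOURCE B (Python) =====
-- def is_plusone_dictionary(d):
--     # One pass over the items with a running `prev` value; no flattened list.
--     prev = None
--     for key, value in d.items():
--         if prev is not None and key - prev != 1:
--             return False
--         if value - key != 1:
--             return False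
--         prev = value
--     return True
-- ===== Notes on version B (the rewrite author's own statement) =====
-- stated objective: simpler
-- what changed: B drops A's intermediate flattened key/value list and its index-based second pass, checking the adjacent-difference chain in a single pass over the items with a running previous value.
import Mathlib
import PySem

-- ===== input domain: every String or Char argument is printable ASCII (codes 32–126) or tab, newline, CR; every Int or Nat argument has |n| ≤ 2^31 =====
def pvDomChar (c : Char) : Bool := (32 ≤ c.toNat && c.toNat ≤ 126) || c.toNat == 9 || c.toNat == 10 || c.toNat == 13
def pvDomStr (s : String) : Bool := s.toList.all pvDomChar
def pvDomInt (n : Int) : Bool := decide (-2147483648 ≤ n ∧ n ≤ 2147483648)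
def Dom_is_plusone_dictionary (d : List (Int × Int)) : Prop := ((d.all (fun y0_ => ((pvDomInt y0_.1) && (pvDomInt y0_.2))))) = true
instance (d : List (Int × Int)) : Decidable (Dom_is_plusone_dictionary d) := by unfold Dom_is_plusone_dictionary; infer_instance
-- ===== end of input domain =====

-- B replaces A's flattened key/value list and index-based scan by a single pass over the items
-- with a running previous value (objective: simpler).


-- ===== PORT A =====
-- d[key]: first-match lookup in the association list (exact for a Python dict, whose keys are unique)
def pvLookupA : List (Int × Int) → Int → Int
  | [], _ => 0
  | (a, b) :: rest, k => if a = k then b else pvLookupA rest k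

-- the second loop: for index in range(1, len(dict_list)): if l[index] - l[index-1] != 1: return False
def pvScanA (l : List Int) : List Int → Bool
  | [] => true
  | i :: rest =>
    if PySem.List.pyGetD l i 0 - PySem.List.pyGetD l (i - 1) 0 ≠ 1 then false
    else pvScanA l rest

def is_plusone_dictionary (d : List (Int × Int)) : Bool :=
  let dict_list := d.foldl (fun acc kv => acc ++ [kv.1, pvLookupA d kv.1]) []
  pvScanA dict_list (PySem.List.pyRange 1 dict_list.length 1)

-- ===== PORT B =====
def pvGoB : Option Int → List (Int × Int) → Bool
  | _, [] => true
  | none, (k, v) :: rest => if v - k ≠ 1 then false else pvGoB (some v) rest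
  | some p, (k, v) :: rest =>
    if k - p ≠ 1 then false
    else if v - k ≠ 1 then false
    else pvGoB (some v) rest

def is_plusone_dictionary_alt (d : List (Int × Int)) : Bool := pvGoB none d

-- ===== PRECONDITION & SPEC =====
-- Pre_ excludes association lists with duplicate keys: the Python argument is a dict, whose
-- keys are unique, so such lists represent no actual input of A.
def Pre_is_plusone_dictionary (d : List (Int × Int)) : Prop := (d.map Prod.fst).Nodup
instance (d : List (Int × Int)) : Decidable (Pre_is_plusone_dictionary d) := by
  unfold Pre_is_plusone_dictionary; infer_instance
def pvWitness_is_plusone_dictionary : (List (Int × Int)) := [(1, 2), (3, 4)]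

def Spec_is_plusone_dictionary (d : List (Int × Int)) (out : Bool) : Prop := out = is_plusone_dictionary_alt d
instance (d : List (Int × Int)) (out : Bool) : Decidable (Spec_is_plusone_dictionary d out) := by unfold Spec_is_plusone_dictionary; infer_instance

-- ===== CLAIM (what is proved, stated in full; the proofs are below) =====
def Claim_equal_is_plusone_dictionary : Prop := ∀ (d : List (Int × Int)), Dom_is_plusone_dictionary d → Pre_is_plusone_dictionary d → Spec_is_plusone_dictionary d (is_plusone_dictionary d)

-- ===== LEMMAS AND PROOFS =====

-- flattening of the items, as A's first loop computes it when all lookups hit the pair's own value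
def pvFlat (d : List (Int × Int)) : List Int := d.flatMap (fun p => [p.1, p.2])

-- the adjacent-difference chain check, with the previous element as an accumulator
def pvChain : Int → List Int → Bool
  | _, [] => true
  | p, x :: xs => if x - p ≠ 1 then false else pvChain x xs

theorem pvLookupA_eq {d : List (Int × Int)} (h : (d.map Prod.fst).Nodup)
    {k v : Int} (hm : (k, v) ∈ d) : pvLookupA d k = v := by
  induction d with
  | nil => cases hm
  | cons hd tl ih =>
    obtain ⟨a, b⟩ := hd
    simp only [List.map_cons, List.nodup_cons] at h
    rcases List.mem_cons.mp hm with heq | htl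
    · simp only [Prod.mk.injEq] at heq
      simp [pvLookupA, heq.1, heq.2]
    · have hak : a ≠ k := by
        intro hak; subst hak
        exact h.1 (List.mem_map.mpr ⟨(a, v), htl, rfl⟩)
      simp [pvLookupA, hak, ih h.2 htl]

theorem pvFoldl_eq (d0 : List (Int × Int)) :
    ∀ (d : List (Int × Int)) (acc : List Int),
      (∀ kv ∈ d, pvLookupA d0 kv.1 = kv.2) →
      d.foldl (fun acc kv => acc ++ [kv.1, pvLookupA d0 kv.1]) acc = acc ++ pvFlat d := by
  intro d
  induction d with
  | nil => intro acc _; simp [pvFlat]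
  | cons hd tl ih =>
    intro acc h
    have hhd := h hd (List.mem_cons_self ..)
    simp only [List.foldl_cons, hhd]
    rw [ih (acc ++ [hd.1, hd.2]) (fun kv hkv => h kv (List.mem_cons_of_mem _ hkv))]
    simp [pvFlat]

theorem pvScan_eq : ∀ (suf : List Int) (p : Int) (pre : List Int),
    pvScanA (pre ++ p :: suf) (PySem.List.pyRange ((pre.length : Int) + 1) ((pre ++ p :: suf).length : Int) 1)
      = pvChain p suf := by
  intro suf
  induction suf with
  | nil =>
    intro p pre
    rw [PySem.List.pyRange_one_eq_nil (by simp)]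
    rfl
  | cons x xs ih =>
    intro p pre
    have hlen : ((pre ++ p :: x :: xs).length : Int) = (pre.length : Int) + 2 + xs.length := by
      simp; omega
    rw [PySem.List.pyRange_one_cons (by rw [hlen]; omega)]
    show (if PySem.List.pyGetD (pre ++ p :: x :: xs) ((pre.length : Int) + 1) 0
            - PySem.List.pyGetD (pre ++ p :: x :: xs) ((pre.length : Int) + 1 - 1) 0 ≠ 1 then false
          else pvScanA (pre ++ p :: x :: xs) (PySem.List.pyRange ((pre.length : Int) + 1 + 1) _ 1)) = _
    have h1 : PySem.List.pyGetD (pre ++ p :: x :: xs) ((pre.length : Int) + 1 - 1) 0 = p := by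
      have : ((pre.length : Int) + 1 - 1) = ((pre.length : Nat) : Int) := by omega
      rw [this, PySem.List.pyGetD_natCast]
      simp [List.getD]
    have h2 : PySem.List.pyGetD (pre ++ p :: x :: xs) ((pre.length : Int) + 1) 0 = x := by
      have : ((pre.length : Int) + 1) = (((pre ++ [p]).length : Nat) : Int) := by simp
      rw [this, PySem.List.pyGetD_natCast]
      have : pre ++ p :: x :: xs = (pre ++ [p]) ++ x :: xs := by simp
      rw [this]
      simp [List.getD]
    rw [h1, h2]
    by_cases hx : x - p ≠ 1
    · simp [pvChain, hx]
    · have heq : pre ++ p :: x :: xs = (pre ++ [p]) ++ x :: xs := by simp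
      have harg : (pre.length : Int) + 1 + 1 = (((pre ++ [p]).length : Nat) : Int) + 1 := by simp
      simp only [hx, if_false, heq, harg, ih x (pre ++ [p])]
      simp [pvChain, hx]

theorem pvChain_flat : ∀ (rest : List (Int × Int)) (p : Int),
    pvChain p (pvFlat rest) = pvGoB (some p) rest := by
  intro rest
  induction rest with
  | nil => intro p; rfl
  | cons hd tl ih =>
    intro p
    obtain ⟨k, v⟩ := hd
    show pvChain p (k :: v :: pvFlat tl) = _
    by_cases h1 : k - p ≠ 1
    · simp [pvChain, pvGoB, h1]
    · by_cases h2 : v - k ≠ 1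
      · simp [pvChain, pvGoB, h1, h2]
      · simp [pvChain, pvGoB, h1, h2, ih v]

-- ===== VERDICT (by name: the statement is the Claim_ definition above) =====
theorem is_plusone_dictionary_spec : Claim_equal_is_plusone_dictionary := by
  intro d _ hpre
  unfold Spec_is_plusone_dictionary is_plusone_dictionary is_plusone_dictionary_alt
  have hfold := pvFoldl_eq d d [] (fun kv hkv => pvLookupA_eq hpre (by exact hkv))
  simp only [List.nil_append] at hfold
  rw [hfold]
  cases d with
  | nil => rfl
  | cons hd tl =>
    obtain ⟨k, v⟩ := hd
    show pvScanA (pvFlat ((k, v) :: tl))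
        (PySem.List.pyRange 1 ((pvFlat ((k, v) :: tl)).length : Int) 1) = pvGoB none ((k, v) :: tl)
    have hflat : pvFlat ((k, v) :: tl) = [] ++ k :: (v :: pvFlat tl) := by simp [pvFlat]
    rw [hflat]
    have hsc := pvScan_eq (v :: pvFlat tl) k []
    simp only [List.length_nil, Nat.cast_zero, zero_add, List.nil_append] at hsc ⊢
    rw [hsc]
    show pvChain k (v :: pvFlat tl) = pvGoB none ((k, v) :: tl)
    by_cases h2 : v - k ≠ 1
    · simp [pvChain, pvGoB, h2]
    · simp [pvChain, pvGoB, h2, pvChain_flat tl v]
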